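-- pv_equiv track=rewrite | github.com/MrBrantCode/unitest_baseline | mut_generate/mist_train_taco/taco_11243/solution.py | get_team_ranking
-- ===== SOURCE A (Python) =====
-- def get_team_ranking(qualifying_results, queries):
--     # Initialize data structures
--     teams = [0] * 101  # To store the number of correct answers for each team
--     points = [False] * 31  # To track which points have been achieved
--
--     # Process qualifying results
--     for ref_num, correct_answers in qualifying_results:
--         if ref_num == 0 and correct_answers == 0:
--             break
--         teams[ref_num] = correct_answers
--         points[correct_answers] = True
--
--     # Calculate rankings for each query
--     rankings = []
--     for query in queries:
--         p = teams[query]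
--         rank = 0
--         for i in range(30, -1, -1):
--             if points[i]:
--                 rank += 1
--             if i == p:
--                 break
--         rankings.append(rank)
--
--     return rankings
-- ===== SOURCE B (Python) =====
-- def get_team_ranking(qualifying_results, queries):
--     # Process qualifying results (same as the original: fill the score arrays)
--     teams = [0] * 101
--     points = [False] * 31
--     for ref_num, correct_answers in qualifying_results:
--         if ref_num == 0 and correct_answers == 0:
--             break
--         teams[ref_num] = correct_answers
--         points[correct_answers] = True
--
--     # Sorted (ascending) list of achieved scores
--     achieved = [s for s in range(31) if points[s]]
--     n = len(achieved)
--
--     # A team's rank is the number of achieved scores >= its score: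
--     # binary search for the first achieved score >= p
--     rankings = []
--     for query in queries:
--         p = teams[query]
--         lo, hi = 0, n
--         while lo < hi:
--             mid = (lo + hi) // 2
--             if achieved[mid] < p:
--                 lo = mid + 1
--             else:
--                 hi = mid
--         rankings.append(n - lo)
--     return rankings
-- ===== Notes on version B (the rewrite author's own statement) =====
-- stated objective: alternative
-- what changed: Keeps the qualifying-results processing, then replaces A's per-query downward scan over points[] by building the sorted list of achieved scores once and answering each query with a binary search (rank = number of achieved scores >= the team's score).
import Mathlib
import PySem

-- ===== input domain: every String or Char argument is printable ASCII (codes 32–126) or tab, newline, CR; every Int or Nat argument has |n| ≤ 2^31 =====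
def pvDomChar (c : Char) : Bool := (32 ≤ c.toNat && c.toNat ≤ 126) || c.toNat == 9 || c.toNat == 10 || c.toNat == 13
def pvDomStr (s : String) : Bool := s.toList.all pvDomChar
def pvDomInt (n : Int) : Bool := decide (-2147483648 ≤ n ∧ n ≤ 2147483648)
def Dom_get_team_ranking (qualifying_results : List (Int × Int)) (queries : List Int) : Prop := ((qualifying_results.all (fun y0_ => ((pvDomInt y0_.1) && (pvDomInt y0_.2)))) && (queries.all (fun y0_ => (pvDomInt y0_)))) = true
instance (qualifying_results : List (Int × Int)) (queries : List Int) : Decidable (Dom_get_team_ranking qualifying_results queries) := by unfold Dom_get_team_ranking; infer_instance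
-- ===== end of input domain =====

-- B keeps A's processing of the qualifying results, then replaces A's per-query downward scan
-- over points[] by one sorted list of achieved scores plus a binary search per query.


-- ===== PORT A =====
-- the first for-loop (with its break at (0,0)): fills teams[] and points[]
def pvA_fill : List (Int × Int) → List Int → List Bool → List Int × List Bool
  | [], teams, points => (teams, points)
  | (r, c) :: rest, teams, points =>
    if r = 0 ∧ c = 0 then (teams, points)
    else pvA_fill rest (PySem.List.pySetD teams r c) (PySem.List.pySetD points c true)

-- the inner 'for i in range(30, -1, -1)' with its break at i == p
def pvA_rankLoop (points : List Bool) (p : Int) : List Int → Int → Int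
  | [], rank => rank
  | i :: rest, rank =>
    let rank' := if PySem.List.pyGetD points i false then rank + 1 else rank
    if i = p then rank' else pvA_rankLoop points p rest rank'

def get_team_ranking (qualifying_results : List (Int × Int)) (queries : List Int) : List Int :=
  let st := pvA_fill qualifying_results (List.replicate 101 0) (List.replicate 31 false)
  queries.map (fun query =>
    let p := PySem.List.pyGetD st.1 query 0
    pvA_rankLoop st.2 p (PySem.List.pyRange 30 (-1) (-1)) 0)

-- ===== PORT B =====
-- Source B's first loop: identical processing of the qualifying results
def pvB_fill : List (Int × Int) → List Int → List Bool → List Int × List Bool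
  | [], teams, points => (teams, points)
  | (r, c) :: rest, teams, points =>
    if r = 0 ∧ c = 0 then (teams, points)
    else pvB_fill rest (PySem.List.pySetD teams r c) (PySem.List.pySetD points c true)

-- Source B's while-loop: binary search for the first index in [lo, hi) with achieved[mid] >= p
def pvB_bsearch (achieved : List Int) (p : Int) (lo hi : Int) : Int :=
  if h : lo < hi then
    let mid := PySem.Int.floordiv (lo + hi) 2
    if PySem.List.pyGetD achieved mid 0 < p then pvB_bsearch achieved p (mid + 1) hi
    else pvB_bsearch achieved p lo mid
  else lo
termination_by (hi - lo).toNat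
decreasing_by
  · have := (PySem.Int.floordiv_two_mid_bounds (le_of_lt h)).1
    omega
  · have hlt : PySem.Int.floordiv (lo + hi) 2 < hi := by
      rw [PySem.Int.floordiv_lt_iff_lt_mul (by omega)]
      omega
    have := (PySem.Int.floordiv_two_mid_bounds (le_of_lt h)).1
    omega

def get_team_ranking_alt (qualifying_results : List (Int × Int)) (queries : List Int) : List Int :=
  let st := pvB_fill qualifying_results (List.replicate 101 0) (List.replicate 31 false)
  let achieved := (PySem.List.pyRange 0 31 1).filter (fun s => PySem.List.pyGetD st.2 s false)
  let n : Int := achieved.length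
  queries.map (fun query =>
    let p := PySem.List.pyGetD st.1 query 0
    n - pvB_bsearch achieved p 0 n)

-- ===== PRECONDITION & SPEC =====
-- Pre_ is exactly the condition under which the Python A returns without raising IndexError:
-- every pair read before the (0,0) sentinel must index teams[] (101 slots) and points[] (31 slots)
-- within Python's index range (negative indices wrap), and so must every query.
def Pre_get_team_ranking (qualifying_results : List (Int × Int)) (queries : List Int) : Prop :=
  (∀ pr ∈ qualifying_results.takeWhile (fun pr => !(pr.1 == 0 && pr.2 == 0)),
      -101 ≤ pr.1 ∧ pr.1 ≤ 100 ∧ -31 ≤ pr.2 ∧ pr.2 ≤ 30) ∧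
  (∀ q ∈ queries, -101 ≤ q ∧ q ≤ 100)
instance (qualifying_results : List (Int × Int)) (queries : List Int) : Decidable (Pre_get_team_ranking qualifying_results queries) := by unfold Pre_get_team_ranking; infer_instance

def pvWitness_get_team_ranking : (List (Int × Int)) × List Int :=
  ([(1, 5), (2, 10), (0, 0), (7, 3)], [1, 2, 3])

def Spec_get_team_ranking (qualifying_results : List (Int × Int)) (queries : List Int) (out : List Int) : Prop := out = get_team_ranking_alt qualifying_results queries
instance (qualifying_results : List (Int × Int)) (queries : List Int) (out : List Int) : Decidable (Spec_get_team_ranking qualifying_results queries out) := by unfold Spec_get_team_ranking; infer_instance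

-- ===== CLAIM (what is proved, stated in full; the proofs are below) =====
def Claim_equal_get_team_ranking : Prop := ∀ (qualifying_results : List (Int × Int)) (queries : List Int), Dom_get_team_ranking qualifying_results queries → Pre_get_team_ranking qualifying_results queries → Spec_get_team_ranking qualifying_results queries (get_team_ranking qualifying_results queries)

-- ===== LEMMAS AND PROOFS =====

-- the two fill loops are the same recursion
lemma pvFills_eq (qr : List (Int × Int)) :
    ∀ teams points, pvB_fill qr teams points = pvA_fill qr teams points := by
  induction qr with
  | nil => intro teams points; rfl
  | cons hd rest ih =>
    obtain ⟨r, c⟩ := hd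
    intro teams points
    by_cases hz : r = 0 ∧ c = 0
    · simp only [pvA_fill, pvB_fill, if_pos hz]
    · simp only [pvA_fill, pvB_fill, if_neg hz]
      exact ih _ _

lemma pvFill_len (qr : List (Int × Int)) :
    ∀ teams points, (pvA_fill qr teams points).1.length = teams.length ∧
      (pvA_fill qr teams points).2.length = points.length := by
  induction qr with
  | nil => intro teams points; exact ⟨rfl, rfl⟩
  | cons hd rest ih =>
    obtain ⟨r, c⟩ := hd
    intro teams points
    by_cases hz : r = 0 ∧ c = 0
    · simp only [pvA_fill, if_pos hz]
      exact ⟨trivial, trivial⟩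
    · simp only [pvA_fill, if_neg hz]
      rw [(ih _ _).1, (ih _ _).2, PySem.List.length_pySetD, PySem.List.length_pySetD]
      exact ⟨rfl, rfl⟩

lemma pvMem_pySetD {α : Type} {xs : List α} {i : Int} {v x : α}
    (h : x ∈ PySem.List.pySetD xs i v) : x ∈ xs ∨ x = v := by
  unfold PySem.List.pySetD PySem.List.pySet? at h
  cases hk : PySem.List.pyIdx? xs.length i with
  | none => rw [hk] at h; simp at h; exact Or.inl h
  | some k =>
    rw [hk] at h
    simp only [Option.map_some, Option.getD_some] at h
    rcases List.mem_or_eq_of_mem_set h with h' | h'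
    · exact Or.inl h'
    · exact Or.inr h'

-- the teams array only ever holds 0 or a score written before the sentinel
lemma pvFill_le30 (qr : List (Int × Int)) :
    ∀ teams points,
      (∀ pr ∈ qr.takeWhile (fun pr => !(pr.1 == 0 && pr.2 == 0)), pr.2 ≤ 30) →
      (∀ x ∈ teams, x ≤ 30) →
      ∀ x ∈ (pvA_fill qr teams points).1, x ≤ 30 := by
  induction qr with
  | nil => intro teams points _ ht; exact ht
  | cons hd rest ih =>
    obtain ⟨r, c⟩ := hd
    intro teams points hpre ht
    by_cases hz : r = 0 ∧ c = 0
    · simp only [pvA_fill, if_pos hz]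
      exact ht
    · have hpred : (!((r, c).1 == 0 && (r, c).2 == 0)) = true := by
        simp only [Bool.not_eq_eq_eq_not, Bool.not_true, Bool.and_eq_false_iff,
          beq_eq_false_iff_ne, ne_eq]
        tauto
      simp only [List.takeWhile_cons] at hpre
      rw [if_pos hpred] at hpre
      have hc := hpre (r, c) List.mem_cons_self
      simp only [pvA_fill, if_neg hz]
      apply ih _ _ (fun pr hp => hpre pr (List.mem_cons_of_mem _ hp))
      intro x hx
      rcases pvMem_pySetD hx with h' | h'
      · exact ht x h'
      · omega

-- the descending list [k, k-1, …, 0]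
def pvDesc : Nat → List Int
  | 0 => [0]
  | k + 1 => ((k : Int) + 1) :: pvDesc k

lemma pvDesc_eq_range : PySem.List.pyRange 30 (-1) (-1) = pvDesc 30 := by decide

-- 'score i achieved and i ≥ p', as a predicate on Nat indices
def pvPred (points : List Bool) (p : Int) (i : Nat) : Bool :=
  PySem.List.pyGetD points (i : Int) false && decide (p ≤ (i : Int))

-- A's inner loop counts the achieved scores ≥ p (for any p ≤ k, negative included)
lemma pvRankLoop_count (points : List Bool) (k : Nat) :
    ∀ (p : Int) (rank : Int), p ≤ (k : Int) →
    pvA_rankLoop points p (pvDesc k) rank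
      = rank + ((List.range (k + 1)).countP (pvPred points p) : Int) := by
  induction k with
  | zero =>
    intro p rank hp
    simp only [Nat.cast_zero] at hp
    have hpred : pvPred points p 0 = PySem.List.pyGetD points 0 false := by
      unfold pvPred
      rw [decide_eq_true (by exact_mod_cast hp : p ≤ ((0 : Nat) : Int)), Bool.and_true]
      exact congrArg _ rfl
    simp only [pvDesc, pvA_rankLoop]
    split_ifs <;> simp_all
  | succ k ih =>
    intro p rank hp
    by_cases hpk : p = (k : Int) + 1
    · subst hpk
      simp only [pvDesc, pvA_rankLoop]
      have hz : (List.range (k + 1)).countP (pvPred points ((k : Int) + 1)) = 0 := by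
        apply List.countP_eq_zero.mpr
        intro i hi
        rw [List.mem_range] at hi
        unfold pvPred
        rw [decide_eq_false (by omega : ¬ ((k : Int) + 1 ≤ (i : Int))), Bool.and_false]
        simp
      rw [List.range_succ, List.countP_append, hz, List.countP_cons, List.countP_nil]
      have hpred : pvPred points ((k : Int) + 1) (k + 1)
          = PySem.List.pyGetD points ((k : Int) + 1) false := by
        unfold pvPred
        rw [decide_eq_true (by push_cast; omega : (k : Int) + 1 ≤ ((k + 1 : Nat) : Int)),
          Bool.and_true, show ((k + 1 : Nat) : Int) = (k : Int) + 1 by push_cast; ring]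
      simp only [Nat.zero_add, hpred]
      split_ifs <;> simp
    · have hple : p ≤ (k : Int) := by omega
      have hne : ((k : Int) + 1) ≠ p := fun h => hpk h.symm
      simp only [pvDesc, pvA_rankLoop, hne, if_false]
      rw [ih p _ hple]
      have hpred : pvPred points p (k + 1)
          = PySem.List.pyGetD points ((k : Int) + 1) false := by
        unfold pvPred
        rw [decide_eq_true (by push_cast; omega : p ≤ ((k + 1 : Nat) : Int)),
          Bool.and_true, show ((k + 1 : Nat) : Int) = (k : Int) + 1 by push_cast; ring]
      rw [show List.range (k + 1 + 1) = List.range (k + 1) ++ [k + 1] from List.range_succ,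
        List.countP_append, List.countP_cons, List.countP_nil]
      simp only [Nat.zero_add, hpred]
      split_ifs <;> push_cast <;> ring

-- on a strictly increasing list, the elements < p are exactly the prefix of length
-- (takeWhile (< p)).length
lemma pvBoundary (p : Int) : ∀ (a : List Int), a.Pairwise (· < ·) →
    ∀ i (h : i < a.length),
      (a[i] < p ↔ i < (a.takeWhile (fun x => decide (x < p))).length) := by
  intro a
  induction a with
  | nil => intro _ i h; simp at h
  | cons x xs ih =>
    intro hp i h
    rw [List.pairwise_cons] at hp
    by_cases hx : x < p
    · rw [List.takeWhile_cons_of_pos (by simpa using hx)]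
      cases i with
      | zero => simpa using hx
      | succ j =>
        simp only [List.getElem_cons_succ, List.length_cons]
        rw [ih hp.2 j (by simpa using h)]
        omega
    · rw [List.takeWhile_cons_of_neg (by simpa using hx)]
      cases i with
      | zero => simpa using hx
      | succ j =>
        simp only [List.getElem_cons_succ, List.length_nil]
        constructor
        · intro hj
          exfalso
          have hjlen : j < xs.length := by simpa using h
          have := hp.1 (xs[j]'hjlen) (List.getElem_mem _)
          omega
        · omega

-- the binary search returns the boundary index
lemma pvB_bsearch_eq (a : List Int) (p : Int) (B : Int)
    (H : ∀ i : Nat, (h : i < a.length) → (a[i] < p ↔ (i : Int) < B)) :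
    ∀ lo hi : Int, 0 ≤ lo → hi ≤ a.length → lo ≤ B → B ≤ hi →
      pvB_bsearch a p lo hi = B := by
  intro lo hi
  induction lo, hi using pvB_bsearch.induct a p with
  | case1 lo hi h mid hmlt ih =>
    intro hlo hhi hloB hBhi
    have hmid : mid = PySem.Int.floordiv (lo + hi) 2 := rfl
    have hb := PySem.Int.floordiv_two_mid_bounds (le_of_lt h)
    have hmhi : mid < hi := by
      rw [hmid, PySem.Int.floordiv_lt_iff_lt_mul (by omega : (0:Int) < 2)]
      omega
    have h0m : 0 ≤ mid := by rw [hmid]; omega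
    have hml : mid < (a.length : Int) := by omega
    have hg : PySem.List.pyGetD a mid 0 = a[mid.toNat]'(by omega) :=
      PySem.List.pyGetD_eq_getElem a 0 h0m hml
    have hmB : mid < B := by
      have := (H mid.toNat (by omega)).mp (by rw [← hg]; exact hmlt)
      omega
    rw [pvB_bsearch, dif_pos h, if_pos hmlt]
    exact ih (by omega) hhi (by omega) hBhi
  | case2 lo hi h mid hmge ih =>
    intro hlo hhi hloB hBhi
    have hmid : mid = PySem.Int.floordiv (lo + hi) 2 := rfl
    have hb := PySem.Int.floordiv_two_mid_bounds (le_of_lt h)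
    have hmhi : mid < hi := by
      rw [hmid, PySem.Int.floordiv_lt_iff_lt_mul (by omega : (0:Int) < 2)]
      omega
    have h0m : 0 ≤ mid := by rw [hmid]; omega
    have hml : mid < (a.length : Int) := by omega
    have hg : PySem.List.pyGetD a mid 0 = a[mid.toNat]'(by omega) :=
      PySem.List.pyGetD_eq_getElem a 0 h0m hml
    have hBm : B ≤ mid := by
      by_contra hc
      exact hmge (by rw [hg]; exact (H mid.toNat (by omega)).mpr (by omega))
    rw [pvB_bsearch, dif_pos h, if_neg hmge]
    exact ih hlo (by omega) hloB hBm
  | case3 lo hi h =>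
    intro _ _ h1 h2
    rw [pvB_bsearch, dif_neg h]
    omega

-- on a strictly increasing list, takeWhile (< p) keeps exactly the elements < p
lemma pvTW_eq_filter (p : Int) : ∀ (a : List Int), a.Pairwise (· < ·) →
    a.takeWhile (fun x => decide (x < p)) = a.filter (fun x => decide (x < p)) := by
  intro a
  induction a with
  | nil => intro _; rfl
  | cons x xs ih =>
    intro hp
    rw [List.pairwise_cons] at hp
    by_cases hx : x < p
    · rw [List.takeWhile_cons_of_pos (by simpa using hx),
        List.filter_cons_of_pos (by simpa using hx), ih hp.2]
    · rw [List.takeWhile_cons_of_neg (by simpa using hx),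
        List.filter_cons_of_neg (by simpa using hx)]
      symm
      rw [List.filter_eq_nil_iff]
      intro y hy
      have := hp.1 y hy
      simp only [decide_eq_true_eq]
      omega

-- ===== VERDICT (by name: the statement is the Claim_ definition above) =====
theorem get_team_ranking_spec : Claim_equal_get_team_ranking := by
  intro qr qs _ hpre
  unfold Spec_get_team_ranking get_team_ranking get_team_ranking_alt
  rw [pvFills_eq]
  simp only []
  apply List.map_congr_left
  intro q hq
  obtain ⟨hq0, hq1⟩ := hpre.2 q hq
  have hlen := pvFill_len qr (List.replicate 101 0) (List.replicate 31 false)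
  rw [List.length_replicate] at hlen
  rw [List.length_replicate] at hlen
  set st := pvA_fill qr (List.replicate 101 0) (List.replicate 31 false) with hst
  -- the queried score is at most 30
  have hpmem : PySem.List.pyGetD st.1 q 0 ∈ st.1 := by
    apply PySem.List.pyGetD_mem
    rw [hlen.1]
    constructor
    · push_cast; omega
    · push_cast; omega
  have hple : PySem.List.pyGetD st.1 q 0 ≤ 30 := by
    apply pvFill_le30 qr _ _ (fun pr hpr => (hpre.1 pr hpr).2.2.2) _ _ hpmem
    intro x hx
    rw [List.mem_replicate] at hx
    omega
  set p := PySem.List.pyGetD st.1 q 0 with hpdef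
  set points := st.2 with hpts
  -- A's side: the inner loop counts the achieved scores ≥ p
  rw [pvDesc_eq_range, pvRankLoop_count points 30 p 0 (by exact_mod_cast hple), zero_add]
  -- B's side: the binary search finds the boundary of the sorted achieved list
  set a := (PySem.List.pyRange 0 31 1).filter (fun s => PySem.List.pyGetD points s false) with ha
  have hpair : a.Pairwise (· < ·) := by
    have hr : PySem.List.pyRange 0 31 1 = (List.range 31).map (fun n : Nat => (n : Int)) := by
      decide
    rw [ha, hr]
    exact List.Pairwise.filter _
      (List.Pairwise.map _ (fun a b hab => by exact_mod_cast hab) List.pairwise_lt_range)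
  set tw := a.takeWhile (fun x => decide (x < p)) with htw
  have hBn : tw.length ≤ a.length := by
    rw [htw]; exact (List.takeWhile_prefix _).length_le
  have hH : ∀ i : Nat, (h : i < a.length) → (a[i] < p ↔ (i : Int) < (tw.length : Int)) := by
    intro i h
    rw [pvBoundary p a hpair i h]
    exact ⟨fun hlt => by exact_mod_cast hlt, fun hlt => by exact_mod_cast hlt⟩
  rw [pvB_bsearch_eq a p (tw.length : Int) hH 0
    (a.length : Int) (le_refl 0) (le_refl _) (by positivity) (by exact_mod_cast hBn)]
  -- counting: |a| - |takeWhile| = number of achieved scores ≥ p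
  rw [htw, pvTW_eq_filter p a hpair]
  have hsplit : a.length = (a.filter (fun x => decide (x < p))).length
      + (a.filter (fun x => !decide (x < p))).length :=
    List.length_eq_length_filter_add _
  have hcnt : (a.filter (fun x => !decide (x < p))).length
      = (List.range (30 + 1)).countP (pvPred points p) := by
    rw [← List.countP_eq_length_filter, ha, List.countP_filter,
      show PySem.List.pyRange 0 31 1 = (List.range 31).map (fun n : Nat => (n : Int)) by decide,
      List.countP_map, show (31 : Nat) = 30 + 1 from rfl]
    apply List.countP_congr
    intro i _
    unfold pvPred
    simp only [Function.comp]
    rw [show (!decide ((i : Int) < p)) = decide (p ≤ (i : Int)) by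
      rw [← decide_not]; simp [not_lt], Bool.and_comm]
  omega
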